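-- pv_equiv track=rewrite | github.com/aRedCloth/heuristic | LabelFunction/LF_helper.py | match_label_for_form_with_rules
-- ===== SOURCE A (Python) =====
-- def match_label_for_form_with_rules(label_form, rules):#["negation","positive"]->"positive"
--
--     transformed_labels = []  # 存储转换后的标签
--     i = 0  # 从 label_form 的起始位置开始
--
--     while i < len(label_form):
--         best_match = None  # 当前找到的最长匹配模式
--         best_sentiment_label = None  # 当前找到的匹配类别
--         best_length = 0  # 当前找到的最长匹配长度
--
--         # 遍历规则，寻找最长匹配
--         for sentiment_label, forms in rules.items():
--             for form in forms:
--                 # 检查当前位置的子列表是否与规则匹配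
--                 if label_form[i:i + len(form)] == form:
--                     # 更新最佳匹配
--                     if len(form) > best_length:
--                         best_match = form
--                         best_sentiment_label = sentiment_label
--                         best_length = len(form)
--
--         # 如果找到匹配规则
--         if best_match:
--             transformed_labels.append(best_sentiment_label)  # 替换为匹配的类别
--             i += best_length  # 跳过匹配的部分
--         else:
--             # 未找到匹配规则，保留当前标签
--             transformed_labels.append(label_form[i])
--             i += 1  # 继续下一个标签
--
--     return transformed_labels
-- ===== SOURCE B (Python) =====
-- def match_label_for_form_with_rules(label_form, rules):
--     # Build a first-seen index tuple(form) -> label once, and record the longest form length.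
--     index = {}
--     maxlen = 0
--     for sentiment_label, forms in rules.items():
--         for form in forms:
--             key = tuple(form)
--             if key not in index:
--                 index[key] = sentiment_label
--             if len(form) > maxlen:
--                 maxlen = len(form)
--
--     out = []
--     n = len(label_form)
--     i = 0
--     while i < n:
--         hit = None
--         L = min(maxlen, n - i)
--         while L > 0:
--             lab = index.get(tuple(label_form[i:i + L]))
--             if lab is not None:
--                 hit = (lab, L)
--                 break
--             L -= 1
--         if hit is None:
--             out.append(label_form[i])
--             i += 1
--         else:
--             out.append(hit[0])
--             i += hit[1]
--     return out
-- ===== Notes on version B (the rewrite author's own statement) =====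
-- stated objective: faster
-- what changed: Instead of rescanning every form of every rule at each position, B builds a first-seen dict tuple(form)->label plus the maximal form length once, and at each position probes the slice at descending lengths from min(maxlen, remaining) until a dict hit.
import Mathlib
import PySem

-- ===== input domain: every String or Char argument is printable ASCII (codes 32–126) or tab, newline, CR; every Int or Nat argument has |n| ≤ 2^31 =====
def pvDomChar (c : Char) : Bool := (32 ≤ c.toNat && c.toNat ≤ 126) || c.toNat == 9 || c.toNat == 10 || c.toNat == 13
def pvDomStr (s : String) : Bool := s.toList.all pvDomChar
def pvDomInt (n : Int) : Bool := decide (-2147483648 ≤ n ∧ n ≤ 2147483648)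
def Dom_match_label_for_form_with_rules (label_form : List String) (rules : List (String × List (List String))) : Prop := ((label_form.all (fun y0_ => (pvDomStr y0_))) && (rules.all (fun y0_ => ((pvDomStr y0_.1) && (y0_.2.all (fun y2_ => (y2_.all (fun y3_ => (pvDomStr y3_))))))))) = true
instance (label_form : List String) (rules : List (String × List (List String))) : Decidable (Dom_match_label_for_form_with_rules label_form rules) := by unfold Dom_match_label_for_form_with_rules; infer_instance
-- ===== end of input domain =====

-- B replaces A's per-position rescan of every rule form with a precomputed first-seen
-- dict form→label probed at descending lengths; equivalence of return values is proved.

-- ===== PORT A =====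
-- inner double loop of A at position i: best_match/best_sentiment_label/best_length
def aBest (label_form : List String) (i : Nat) (rules : List (String × List (List String))) :
    Option (List String) × Option String × Nat :=
  rules.foldl
    (fun st r =>
      r.2.foldl
        (fun st form =>
          if PySem.List.slice label_form (some (i : Int)) (some ((i : Int) + (form.length : Int))) == form then
            (if form.length > st.2.2 then (some form, some r.1, form.length) else st)
          else st)
        st)
    (none, none, 0)

-- A's while loop (fuel = number of remaining loop entries; each entry consumes one)
def aLoop (label_form : List String) (rules : List (String × List (List String))) : Nat → Nat → List String
  | 0, _ => []
  | fuel + 1, i =>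
    if i < label_form.length then
      let st := aBest label_form i rules
      match st.1 with
      | some f =>
        if f.isEmpty then label_form.getD i "" :: aLoop label_form rules fuel (i + 1)
        else (st.2.1.getD "") :: aLoop label_form rules fuel (i + st.2.2)
      | none => label_form.getD i "" :: aLoop label_form rules fuel (i + 1)
    else []

def match_label_for_form_with_rules (label_form : List String) (rules : List (String × List (List String))) : List String :=
  aLoop label_form rules label_form.length 0

-- ===== PORT B =====
-- first-seen index form -> label, together with the maximal form length
def bIndex (rules : List (String × List (List String))) : PySem.Dict (List String) String × Nat :=
  rules.foldl
    (fun acc r =>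
      r.2.foldl
        (fun acc form =>
          ((if acc.1.contains form then acc.1 else acc.1.insert form r.1),
           (if form.length > acc.2 then form.length else acc.2)))
        acc)
    (PySem.Dict.empty, 0)

-- B's inner while loop: probe lengths L, L-1, …, 1
def bProbe (label_form : List String) (d : PySem.Dict (List String) String) (i : Nat) : Nat → Option (String × Nat)
  | 0 => none
  | L + 1 =>
    match d.get? (PySem.List.slice label_form (some (i : Int)) (some ((i : Int) + ((L + 1 : Nat) : Int)))) with
    | some lab => some (lab, L + 1)
    | none => bProbe label_form d i L

-- B's outer while loop
def bLoop (label_form : List String) (d : PySem.Dict (List String) String) (maxlen : Nat) : Nat → Nat → List String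
  | 0, _ => []
  | fuel + 1, i =>
    if i < label_form.length then
      match bProbe label_form d i (min maxlen (label_form.length - i)) with
      | some hit => hit.1 :: bLoop label_form d maxlen fuel (i + hit.2)
      | none => label_form.getD i "" :: bLoop label_form d maxlen fuel (i + 1)
    else []

def match_label_for_form_with_rules_alt (label_form : List String) (rules : List (String × List (List String))) : List String :=
  let dm := bIndex rules
  bLoop label_form dm.1 dm.2 label_form.length 0

-- ===== PRECONDITION & SPEC =====
def Spec_match_label_for_form_with_rules (label_form : List String) (rules : List (String × List (List String))) (out : List String) : Prop := out = match_label_for_form_with_rules_alt label_form rules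
instance (label_form : List String) (rules : List (String × List (List String))) (out : List String) : Decidable (Spec_match_label_for_form_with_rules label_form rules out) := by unfold Spec_match_label_for_form_with_rules; infer_instance

-- ===== CLAIM (what is proved, stated in full; the proofs are below) =====
def Claim_equal_match_label_for_form_with_rules : Prop := ∀ (label_form : List String) (rules : List (String × List (List String))), Dom_match_label_for_form_with_rules label_form rules → Spec_match_label_for_form_with_rules label_form rules (match_label_for_form_with_rules label_form rules)

-- ===== LEMMAS AND PROOFS =====

/-- The (label, form) pairs of the rules dict, in iteration order. -/
def pvPairs (rules : List (String × List (List String))) : List (String × List String) :=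
  rules.flatMap (fun r => r.2.map (fun f => (r.1, f)))

/-- The slice label_form[i:i+L] (i, L natural). -/
def pvSeg (lf : List String) (i L : Nat) : List String := (lf.drop i).take L

/-- Does form f match at position i? -/
def pvMtc (lf : List String) (i : Nat) (f : List String) : Bool := pvSeg lf i f.length == f

/-- A's inner-loop body, on a single (label, form) pair. -/
def pvStepA (lf : List String) (i : Nat) (st : Option (List String) × Option String × Nat)
    (p : String × List String) : Option (List String) × Option String × Nat :=
  if pvMtc lf i p.2 then (if p.2.length > st.2.2 then (some p.2, some p.1, p.2.length) else st) else st

/-- B's index-building body on a single pair: first-seen insert. -/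
def pvStepD (d : PySem.Dict (List String) String) (p : String × List String) :
    PySem.Dict (List String) String :=
  if d.contains p.2 then d else d.insert p.2 p.1

def pvStepM (m : Nat) (p : String × List String) : Nat :=
  if p.2.length > m then p.2.length else m

def pvStepB (acc : PySem.Dict (List String) String × Nat) (p : String × List String) :
    PySem.Dict (List String) String × Nat :=
  (pvStepD acc.1 p, pvStepM acc.2 p)

/-- Maximal matching form length at position i (0 if none matches). -/
def pvMaxM (lf : List String) (i : Nat) (ps : List (String × List String)) : Nat :=
  ps.foldr (fun p acc => if pvMtc lf i p.2 then max p.2.length acc else acc) 0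

def pvMaxLen (ps : List (String × List String)) : Nat :=
  ps.foldr (fun p acc => max p.2.length acc) 0

def pvFind (lf : List String) (i M : Nat) (ps : List (String × List String)) :
    Option (String × List String) :=
  ps.find? (fun p => pvMtc lf i p.2 && (p.2.length == M))

theorem pvMaxM_cons (lf : List String) (i : Nat) (p : String × List String)
    (ps : List (String × List String)) :
    pvMaxM lf i (p :: ps) = if pvMtc lf i p.2 then max p.2.length (pvMaxM lf i ps) else pvMaxM lf i ps := rfl

theorem pvMaxLen_cons (p : String × List String) (ps : List (String × List String)) :
    pvMaxLen (p :: ps) = max p.2.length (pvMaxLen ps) := rfl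

/-- Nested rules/forms fold = flat fold over pvPairs. -/
theorem pvNested_eq {σ : Type} (g : σ → (String × List String) → σ) :
    ∀ (rules : List (String × List (List String))) (init : σ),
      rules.foldl (fun st r => r.2.foldl (fun st f => g st (r.1, f)) st) init
        = (pvPairs rules).foldl g init := by
  intro rules
  induction rules with
  | nil => intro init; rfl
  | cons r rs ih =>
    intro init
    have h : pvPairs (r :: rs) = r.2.map (fun f => (r.1, f)) ++ pvPairs rs := by
      simp [pvPairs]
    rw [List.foldl_cons, ih, h, List.foldl_append, List.foldl_map]

theorem pvABest_eq (lf : List String) (i : Nat) (rules : List (String × List (List String))) :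
    aBest lf i rules = (pvPairs rules).foldl (pvStepA lf i) (none, none, 0) := by
  unfold aBest
  rw [show (fun (st : Option (List String) × Option String × Nat) (r : String × List (List String)) =>
        r.2.foldl
          (fun st form =>
            if PySem.List.slice lf (some (i : Int)) (some ((i : Int) + (form.length : Int))) == form then
              (if form.length > st.2.2 then (some form, some r.1, form.length) else st)
            else st)
          st)
      = (fun st (r : String × List (List String)) => r.2.foldl (fun st f => pvStepA lf i st (r.1, f)) st) from ?_]
  · exact pvNested_eq (pvStepA lf i) rules _
  · funext st r
    congr 1
    funext st f
    simp only [pvStepA, pvMtc, pvSeg, PySem.List.slice_natCast_add]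

theorem pvBIndex_eq' (rules : List (String × List (List String))) :
    bIndex rules = (pvPairs rules).foldl pvStepB (PySem.Dict.empty, 0) := by
  unfold bIndex
  rw [show (fun (acc : PySem.Dict (List String) String × Nat) (r : String × List (List String)) =>
        r.2.foldl
          (fun acc form =>
            ((if acc.1.contains form then acc.1 else acc.1.insert form r.1),
             (if form.length > acc.2 then form.length else acc.2)))
          acc)
      = (fun acc (r : String × List (List String)) => r.2.foldl (fun acc f => pvStepB acc (r.1, f)) acc) from ?_]
  · exact pvNested_eq pvStepB rules _
  · rfl

theorem pvSplitB : ∀ (ps : List (String × List String)) (d : PySem.Dict (List String) String) (m : Nat),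
    ps.foldl pvStepB (d, m) = (ps.foldl pvStepD d, ps.foldl pvStepM m) := by
  intro ps
  induction ps with
  | nil => intros; rfl
  | cons p ps ih =>
    intro d m
    rw [List.foldl_cons, List.foldl_cons, List.foldl_cons]
    exact ih _ _

theorem pvMfold : ∀ (ps : List (String × List String)) (m : Nat),
    ps.foldl pvStepM m = max m (pvMaxLen ps) := by
  intro ps
  induction ps with
  | nil => intro m; simp [pvMaxLen]
  | cons p ps ih =>
    intro m
    rw [List.foldl_cons, ih, pvMaxLen_cons]
    unfold pvStepM
    split <;> omega

theorem pvBIndex_eq (rules : List (String × List (List String))) :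
    bIndex rules = ((pvPairs rules).foldl pvStepD PySem.Dict.empty, pvMaxLen (pvPairs rules)) := by
  rw [pvBIndex_eq', pvSplitB, pvMfold, Nat.zero_max]

theorem pvSeg_length (lf : List String) (i L : Nat) :
    (pvSeg lf i L).length = min L (lf.length - i) := by
  simp [pvSeg]

theorem pvSeg_of_mtc {lf : List String} {i : Nat} {f : List String} (hm : pvMtc lf i f = true) :
    f = pvSeg lf i f.length := by
  have := hm
  simp only [pvMtc, beq_iff_eq] at this
  exact this.symm

theorem pvMtc_le {lf : List String} {i : Nat} {f : List String} (hm : pvMtc lf i f = true) :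
    f.length ≤ lf.length - i := by
  have h := congrArg List.length (pvSeg_of_mtc hm)
  rw [pvSeg_length] at h
  omega

theorem pvMtc_of_seg {lf : List String} {i L : Nat} {f : List String}
    (hL : L ≤ lf.length - i) (hf : f = pvSeg lf i L) :
    pvMtc lf i f = true ∧ f.length = L := by
  have hlen : f.length = L := by rw [hf, pvSeg_length]; omega
  refine ⟨?_, hlen⟩
  simp only [pvMtc, hlen, beq_iff_eq]
  exact hf.symm

theorem pvMaxM_ge (lf : List String) (i : Nat) :
    ∀ (ps : List (String × List String)) (p : String × List String),
      p ∈ ps → pvMtc lf i p.2 = true → p.2.length ≤ pvMaxM lf i ps := by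
  intro ps
  induction ps with
  | nil => intro p hp _; simp at hp
  | cons q ps ih =>
    intro p hp hm
    rw [pvMaxM_cons]
    rcases List.mem_cons.mp hp with h | h
    · subst h; rw [if_pos hm]; omega
    · have := ih p h hm
      split <;> omega

theorem pvMaxLen_ge :
    ∀ (ps : List (String × List String)) (p : String × List String),
      p ∈ ps → p.2.length ≤ pvMaxLen ps := by
  intro ps
  induction ps with
  | nil => intro p hp; simp at hp
  | cons q ps ih =>
    intro p hp
    rw [pvMaxLen_cons]
    rcases List.mem_cons.mp hp with h | h
    · subst h; omega
    · have := ih p h; omega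

/-- A's fold leaves the state alone when nothing beats the current best length. -/
theorem pvA3 (lf : List String) (i : Nat) :
    ∀ (ps : List (String × List String)) (b : Option (List String)) (s : Option String) (l : Nat),
      pvMaxM lf i ps ≤ l → ps.foldl (pvStepA lf i) (b, s, l) = (b, s, l) := by
  intro ps
  induction ps with
  | nil => intros; rfl
  | cons p ps ih =>
    intro b s l h
    by_cases hm : pvMtc lf i p.2 = true
    · rw [pvMaxM_cons, if_pos hm] at h
      have h1 : ¬ (p.2.length > l) := by omega
      have hstep : pvStepA lf i (b, s, l) p = (b, s, l) := by simp [pvStepA, hm, h1]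
      rw [List.foldl_cons, hstep]
      exact ih b s l (by omega)
    · rw [pvMaxM_cons, if_neg hm] at h
      have hstep : pvStepA lf i (b, s, l) p = (b, s, l) := by simp [pvStepA, hm]
      rw [List.foldl_cons, hstep]
      exact ih b s l h

/-- A's fold result when something beats the current best length:
    the first pair of maximal matching length wins. -/
theorem pvA2 (lf : List String) (i : Nat) :
    ∀ (ps : List (String × List String)) (b : Option (List String)) (s : Option String) (l : Nat),
      l < pvMaxM lf i ps →
      ∃ p, pvFind lf i (pvMaxM lf i ps) ps = some p ∧
        ps.foldl (pvStepA lf i) (b, s, l) = (some p.2, some p.1, pvMaxM lf i ps) := by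
  intro ps
  induction ps with
  | nil => intro b s l h; simp [pvMaxM] at h
  | cons p ps ih =>
    intro b s l h
    by_cases hm : pvMtc lf i p.2 = true
    · by_cases hl : l < p.2.length
      · have hstep : pvStepA lf i (b, s, l) p = (some p.2, some p.1, p.2.length) := by
          simp [pvStepA, hm, hl]
        rcases Nat.lt_or_ge p.2.length (pvMaxM lf i ps) with h3 | h3
        · have hM : pvMaxM lf i (p :: ps) = pvMaxM lf i ps := by
            rw [pvMaxM_cons, if_pos hm]; omega
          obtain ⟨q, hq1, hq2⟩ := ih (some p.2) (some p.1) p.2.length h3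
          refine ⟨q, ?_, ?_⟩
          · rw [hM]
            unfold pvFind
            rw [List.find?_cons_of_neg (by simp [hm]; omega)]
            exact hq1
          · rw [List.foldl_cons, hstep, hM]; exact hq2
        · have hM : pvMaxM lf i (p :: ps) = p.2.length := by
            rw [pvMaxM_cons, if_pos hm]; omega
          refine ⟨p, ?_, ?_⟩
          · rw [hM]
            unfold pvFind
            rw [List.find?_cons_of_pos (by simp [hm])]
          · rw [List.foldl_cons, hstep, hM, pvA3 lf i ps _ _ _ h3]
      · rw [pvMaxM_cons, if_pos hm] at h
        have hMr : l < pvMaxM lf i ps := by omega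
        have hM : pvMaxM lf i (p :: ps) = pvMaxM lf i ps := by
          rw [pvMaxM_cons, if_pos hm]; omega
        have hstep : pvStepA lf i (b, s, l) p = (b, s, l) := by simp [pvStepA, hm]; omega
        obtain ⟨q, hq1, hq2⟩ := ih b s l hMr
        refine ⟨q, ?_, ?_⟩
        · rw [hM]
          unfold pvFind
          rw [List.find?_cons_of_neg (by simp [hm]; omega)]
          exact hq1
        · rw [List.foldl_cons, hstep, hM]; exact hq2
    · have hM : pvMaxM lf i (p :: ps) = pvMaxM lf i ps := by rw [pvMaxM_cons, if_neg hm]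
      rw [hM] at h
      have hstep : pvStepA lf i (b, s, l) p = (b, s, l) := by simp [pvStepA, hm]
      obtain ⟨q, hq1, hq2⟩ := ih b s l h
      refine ⟨q, ?_, ?_⟩
      · rw [hM]
        unfold pvFind
        rw [List.find?_cons_of_neg (by simp [hm])]
        exact hq1
      · rw [List.foldl_cons, hstep, hM]; exact hq2

theorem pvContains_eq (d : PySem.Dict (List String) String) (k : List String) :
    d.contains k = (d.get? k).isSome := by
  simp only [PySem.Dict.contains, PySem.Dict.get?, Option.isSome_map]
  rw [Bool.eq_iff_iff]
  simp [List.any_eq_true, List.find?_isSome]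

theorem pvFindCongr {α : Type} (p q : α → Bool) :
    ∀ l : List α, (∀ a ∈ l, p a = q a) → l.find? p = l.find? q := by
  intro l
  induction l with
  | nil => intro _; rfl
  | cons x xs ih =>
    intro h
    have hx := h x (by simp)
    cases hq : q x with
    | true =>
      rw [List.find?_cons_of_pos (by rw [hx]; exact hq), List.find?_cons_of_pos hq]
    | false =>
      rw [List.find?_cons_of_neg (by simp [hx, hq]), List.find?_cons_of_neg (by simp [hq])]
      exact ih (fun a ha => h a (by simp [ha]))

/-- Lookup in the first-seen index = first pair with that form. -/
theorem pvDget (k : List String) :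
    ∀ (ps : List (String × List String)) (d : PySem.Dict (List String) String),
      (ps.foldl pvStepD d).get? k
        = (d.get? k).or ((ps.find? (fun p => p.2 == k)).map (fun p => p.1)) := by
  intro ps
  induction ps with
  | nil => intro d; simp
  | cons p ps ih =>
    intro d
    rw [List.foldl_cons]
    by_cases hc : d.contains p.2 = true
    · have hstep : pvStepD d p = d := by simp [pvStepD, hc]
      rw [hstep, ih]
      by_cases hk : p.2 = k
      · have hs : (d.get? k).isSome = true := by rw [← hk, ← pvContains_eq]; exact hc
        obtain ⟨v, hv⟩ := Option.isSome_iff_exists.mp hs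
        rw [hv]
        simp
      · rw [List.find?_cons_of_neg (by simp [hk])]
    · have hstep : pvStepD d p = d.insert p.2 p.1 := by simp [pvStepD, hc]
      rw [hstep, ih]
      by_cases hk : p.2 = k
      · subst hk
        rw [PySem.Dict.get?_insert_self]
        have hn : d.get? p.2 = none := by
          cases ho : d.get? p.2 with
          | none => rfl
          | some v => exact absurd (by rw [pvContains_eq, ho]; rfl) hc
        rw [hn, List.find?_cons_of_pos (by simp)]
        simp
      · rw [PySem.Dict.get?_insert_of_ne _ _ (fun h => hk h.symm)]
        rw [List.find?_cons_of_neg (by simp [hk])]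

theorem pvProbe_none (lf : List String) (d : PySem.Dict (List String) String) (i : Nat) :
    ∀ K : Nat, (∀ L, 1 ≤ L → L ≤ K → d.get? (pvSeg lf i L) = none) → bProbe lf d i K = none := by
  intro K
  induction K with
  | zero => intro _; rfl
  | succ K ih =>
    intro h
    have hs : PySem.List.slice lf (some (i : Int)) (some ((i : Int) + ((K + 1 : Nat) : Int)))
        = pvSeg lf i (K + 1) := by
      rw [PySem.List.slice_natCast_add]; rfl
    have h1 : d.get? (pvSeg lf i (K + 1)) = none := h (K + 1) (by omega) (by omega)
    simp only [bProbe, hs, h1]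
    exact ih (fun L a b => h L a (by omega))

theorem pvProbe_some (lf : List String) (d : PySem.Dict (List String) String) (i : Nat) :
    ∀ (K L0 : Nat) (lab : String), 1 ≤ L0 → L0 ≤ K → d.get? (pvSeg lf i L0) = some lab →
      (∀ L, L0 < L → L ≤ K → d.get? (pvSeg lf i L) = none) →
      bProbe lf d i K = some (lab, L0) := by
  intro K
  induction K with
  | zero => intro L0 lab h1 h2 _ _; omega
  | succ K ih =>
    intro L0 lab h1 h2 hget hnone
    have hs : PySem.List.slice lf (some (i : Int)) (some ((i : Int) + ((K + 1 : Nat) : Int)))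
        = pvSeg lf i (K + 1) := by
      rw [PySem.List.slice_natCast_add]; rfl
    rcases Nat.lt_or_ge L0 (K + 1) with hlt | hge
    · have hn : d.get? (pvSeg lf i (K + 1)) = none := hnone (K + 1) hlt (Nat.le_refl _)
      simp only [bProbe, hs, hn]
      exact ih L0 lab h1 (by omega) hget (fun L a b => hnone L a (by omega))
    · have hEq : L0 = K + 1 := by omega
      subst hEq
      simp only [bProbe, hs, hget]

/-- The two while loops agree step for step. -/
theorem pvLoop (lf : List String) (rules : List (String × List (List String))) :
    ∀ fuel i : Nat,
      aLoop lf rules fuel i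
        = bLoop lf ((pvPairs rules).foldl pvStepD PySem.Dict.empty) (pvMaxLen (pvPairs rules)) fuel i := by
  intro fuel
  induction fuel with
  | zero => intro i; rfl
  | succ fuel ih =>
    intro i
    by_cases hi : i < lf.length
    · rcases Nat.eq_zero_or_pos (pvMaxM lf i (pvPairs rules)) with hM | hM
      · -- no form matches at i: both loops fall back to label_form[i]
        have hA : aBest lf i rules = (none, none, 0) := by
          rw [pvABest_eq]
          exact pvA3 lf i (pvPairs rules) none none 0 (by omega)
        have hB : bProbe lf ((pvPairs rules).foldl pvStepD PySem.Dict.empty) i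
            (min (pvMaxLen (pvPairs rules)) (lf.length - i)) = none := by
          apply pvProbe_none
          intro L h1 h2
          cases hg : ((pvPairs rules).foldl pvStepD PySem.Dict.empty).get? (pvSeg lf i L) with
          | none => rfl
          | some v =>
            exfalso
            rw [pvDget] at hg
            rw [show (PySem.Dict.empty : PySem.Dict (List String) String).get? (pvSeg lf i L) = none from rfl,
              Option.none_or] at hg
            obtain ⟨q, hq1, _⟩ := Option.map_eq_some_iff.mp hg
            have hqm := List.mem_of_find?_eq_some hq1
            have hq2 : q.2 = pvSeg lf i L := by simpa [beq_iff_eq] using List.find?_some hq1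
            have hL_le : L ≤ lf.length - i := le_trans h2 (Nat.min_le_right _ _)
            obtain ⟨hmtc, hlen⟩ := pvMtc_of_seg hL_le hq2
            have := pvMaxM_ge lf i (pvPairs rules) q hqm hmtc
            omega
        simp only [aLoop, bLoop, if_pos hi, hA, hB]
        rw [ih]
      · -- some form matches: both pick the first pair of maximal matching length
        obtain ⟨p, hfind, hfold⟩ := pvA2 lf i (pvPairs rules) none none 0 hM
        have hfind' : (pvPairs rules).find?
            (fun q => pvMtc lf i q.2 && (q.2.length == pvMaxM lf i (pvPairs rules))) = some p := hfind
        have hpred := List.find?_some hfind'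
        obtain ⟨hmtc, hlenb⟩ : pvMtc lf i p.2 = true ∧
            (p.2.length == pvMaxM lf i (pvPairs rules)) = true := by simpa using hpred
        have hlen : p.2.length = pvMaxM lf i (pvPairs rules) := by simpa [beq_iff_eq] using hlenb
        have hmem := List.mem_of_find?_eq_some hfind'
        have hMn : pvMaxM lf i (pvPairs rules) ≤ lf.length - i := hlen ▸ pvMtc_le hmtc
        have hMl : pvMaxM lf i (pvPairs rules) ≤ pvMaxLen (pvPairs rules) :=
          hlen ▸ pvMaxLen_ge (pvPairs rules) p hmem
        have hget : ((pvPairs rules).foldl pvStepD PySem.Dict.empty).get?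
            (pvSeg lf i (pvMaxM lf i (pvPairs rules))) = some p.1 := by
          rw [pvDget,
            show (PySem.Dict.empty : PySem.Dict (List String) String).get?
              (pvSeg lf i (pvMaxM lf i (pvPairs rules))) = none from rfl,
            Option.none_or]
          have hcong : (pvPairs rules).find? (fun q => q.2 == pvSeg lf i (pvMaxM lf i (pvPairs rules)))
              = (pvPairs rules).find? (fun q => pvMtc lf i q.2 && (q.2.length == pvMaxM lf i (pvPairs rules))) := by
            apply pvFindCongr
            intro q _
            rw [Bool.eq_iff_iff]
            simp only [beq_iff_eq, Bool.and_eq_true]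
            constructor
            · intro hq
              obtain ⟨h1, h2⟩ := pvMtc_of_seg hMn hq
              exact ⟨h1, h2⟩
            · intro ⟨h1, h2⟩
              rw [← h2]
              exact pvSeg_of_mtc h1
          rw [hcong, hfind']
          rfl
        have hnone : ∀ L, pvMaxM lf i (pvPairs rules) < L →
            L ≤ min (pvMaxLen (pvPairs rules)) (lf.length - i) →
            ((pvPairs rules).foldl pvStepD PySem.Dict.empty).get? (pvSeg lf i L) = none := by
          intro L hL1 hL2
          cases hg : ((pvPairs rules).foldl pvStepD PySem.Dict.empty).get? (pvSeg lf i L) with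
          | none => rfl
          | some v =>
            exfalso
            rw [pvDget] at hg
            rw [show (PySem.Dict.empty : PySem.Dict (List String) String).get? (pvSeg lf i L) = none from rfl,
              Option.none_or] at hg
            obtain ⟨q, hq1, _⟩ := Option.map_eq_some_iff.mp hg
            have hqm := List.mem_of_find?_eq_some hq1
            have hq2 : q.2 = pvSeg lf i L := by simpa [beq_iff_eq] using List.find?_some hq1
            have hL_le : L ≤ lf.length - i := le_trans hL2 (Nat.min_le_right _ _)
            obtain ⟨hmtc', hlen'⟩ := pvMtc_of_seg hL_le hq2
            have := pvMaxM_ge lf i (pvPairs rules) q hqm hmtc'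
            omega
        have hB := pvProbe_some lf ((pvPairs rules).foldl pvStepD PySem.Dict.empty) i
          (min (pvMaxLen (pvPairs rules)) (lf.length - i)) (pvMaxM lf i (pvPairs rules)) p.1
          (by omega) (by omega) hget hnone
        have hA : aBest lf i rules = (some p.2, some p.1, pvMaxM lf i (pvPairs rules)) := by
          rw [pvABest_eq]; exact hfold
        have hne : p.2.isEmpty = false := by
          cases hx : p.2 with
          | nil => exfalso; rw [hx] at hlen; simp at hlen; omega
          | cons a t => rfl
        simp only [aLoop, bLoop, if_pos hi, hA, hB, hne]
        simp only [Bool.false_eq_true, if_false, Option.getD_some]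
        rw [ih]
    · simp [aLoop, bLoop, hi]

-- ===== VERDICT (by name: the statement is the Claim_ definition above) =====
theorem match_label_for_form_with_rules_spec : Claim_equal_match_label_for_form_with_rules := by
  intro lf rules _
  unfold Spec_match_label_for_form_with_rules
  unfold match_label_for_form_with_rules match_label_for_form_with_rules_alt
  simp only [pvBIndex_eq]
  exact pvLoop lf rules lf.length 0
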